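-- pv_equiv track=rewrite | github.com/divelez69/generative-art-nft-with-restrictions | restriction_code.py | title_style
-- ===== SOURCE A (Python) =====
-- def title_style(name):
--     words = name.split(' ')
--     idxs = [i for i, tr in  enumerate(words) if tr.isupper()]
--     name = name.title()
--     words = name.split(' ')
--     for i in idxs:
--         words[i] = words[i].upper()
--     name = ' '.join(words)
--     return name
-- ===== SOURCE B (Python) =====
-- def title_style(name):
--     return ' '.join(w.upper() if w.isupper() else w.title()
--                     for w in name.split(' '))
-- ===== Notes on version B (the rewrite author's own statement) =====
-- stated objective: simpler
-- what changed: Replaced A's four-step pipeline (collect uppercase word indices, title-case the whole string, re-split, fix up by index) with a single pass over the space-split words that emits w.upper() for all-uppercase words and w.title() otherwise, joined back with spaces; no index list and no second split.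
import Mathlib
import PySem

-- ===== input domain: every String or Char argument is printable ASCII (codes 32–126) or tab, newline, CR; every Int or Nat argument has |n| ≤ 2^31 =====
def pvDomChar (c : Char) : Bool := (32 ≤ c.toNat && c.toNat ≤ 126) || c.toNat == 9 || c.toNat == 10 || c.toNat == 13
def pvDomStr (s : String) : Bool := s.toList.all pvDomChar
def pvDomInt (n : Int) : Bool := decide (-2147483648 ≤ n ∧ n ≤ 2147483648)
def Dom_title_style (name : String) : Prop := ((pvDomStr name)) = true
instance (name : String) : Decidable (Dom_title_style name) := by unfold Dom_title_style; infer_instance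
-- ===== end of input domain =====

-- B replaces A's four-step pipeline (collect uppercase indices, title whole string, re-split, fix up by index)
-- with one pass over the space-split words; objective: simpler. Equivalence proved on all inputs.


-- ===== PORT A =====
-- model of Python str.isupper() (exact on ASCII: some cased char, and no lowercase char)
def pyIsupper (cs : List Char) : Bool :=
  cs.any PySem.Chars.isalpha && !cs.any PySem.Chars.islower

-- model of Python str.title()'s per-character action: `prev` = previous char was cased
def titleChar (prev : Bool) (c : Char) : Char :=
  if PySem.Chars.isalpha c then
    (if prev then PySem.Chars.lowerChar c else PySem.Chars.upperChar c)
  else c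

-- model of Python str.title() (exact on ASCII), threading the `prev` state
def pyTitle (prev : Bool) : List Char → List Char
  | [] => []
  | c :: r => titleChar prev c :: pyTitle (PySem.Chars.isalpha c) r

def title_style (name : String) : String :=
  let words := PySem.Chars.splitOn name.toList [' ']
  let idxs := ((PySem.List.enumerate words).filter (fun p => pyIsupper p.2)).map (·.1)
  let name2 := pyTitle false name.toList
  let words2 := PySem.Chars.splitOn name2 [' ']
  let words3 := idxs.foldl
    (fun ws i => PySem.List.pySetD ws i (PySem.Chars.upper (PySem.List.pyGetD ws i []))) words2
  String.ofList (PySem.Chars.join [' '] words3)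

-- ===== PORT B =====
def title_style_alt (name : String) : String :=
  String.ofList (PySem.Chars.join [' ']
    ((PySem.Chars.splitOn name.toList [' ']).map
      (fun w => if pyIsupper w then PySem.Chars.upper w else pyTitle false w)))

-- ===== PRECONDITION & SPEC =====
def Spec_title_style (name : String) (out : String) : Prop := out = title_style_alt name
instance (name : String) (out : String) : Decidable (Spec_title_style name out) := by unfold Spec_title_style; infer_instance

-- ===== CLAIM (what is proved, stated in full; the proofs are below) =====
def Claim_equal_title_style : Prop := ∀ (name : String), Dom_title_style name → Spec_title_style name (title_style name)

-- ===== LEMMAS AND PROOFS =====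

-- simple structural version of splitting on a single space
def headCons (p : List Char) : List (List Char) → List (List Char)
  | [] => [p]
  | w :: t => (p ++ w) :: t

def mySplit : List Char → List (List Char)
  | [] => [[]]
  | c :: r => if c = ' ' then [] :: mySplit r else headCons [c] (mySplit r)

theorem mySplit_ne_nil (s : List Char) : mySplit s ≠ [] := by
  cases s with
  | nil => simp [mySplit]
  | cons c r =>
    simp only [mySplit]
    split
    · simp
    · cases h : mySplit r <;> simp [headCons]

theorem splitOn_go_eq (fuel : Nat) :
    ∀ (l cur : List Char) (acc : List (List Char)), l.length < fuel →
      PySem.Chars.splitOn.go [' '] fuel l cur acc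
        = acc.reverse ++ headCons cur.reverse (mySplit l) := by
  induction fuel with
  | zero => intro l cur acc h; omega
  | succ fuel ih =>
    intro l cur acc h
    cases l with
    | nil => simp [PySem.Chars.splitOn.go, mySplit, headCons]
    | cons c rest =>
      by_cases hc : c = ' '
      · subst hc
        have hpre : [' '].isPrefixOf (' ' :: rest) = true := by simp [List.isPrefixOf]
        rw [show PySem.Chars.splitOn.go [' '] (fuel+1) (' ' :: rest) cur acc
              = PySem.Chars.splitOn.go [' '] fuel (List.drop 1 (' ' :: rest)) [] (cur.reverse :: acc) by
            simp [PySem.Chars.splitOn.go, hpre]]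
        rw [ih _ _ _ (by simpa using Nat.lt_of_succ_lt_succ h)]
        simp [mySplit, headCons]
        cases hms : mySplit rest with
        | nil => exact absurd hms (mySplit_ne_nil rest)
        | cons w t => simp [headCons]
      · have hpre : [' '].isPrefixOf (c :: rest) = false := by
          simp [List.isPrefixOf]
          intro hh; exact hc hh.symm
        rw [show PySem.Chars.splitOn.go [' '] (fuel+1) (c :: rest) cur acc
              = PySem.Chars.splitOn.go [' '] fuel rest (c :: cur) acc by
            simp [PySem.Chars.splitOn.go, hpre]]
        rw [ih _ _ _ (by simpa using Nat.lt_of_succ_lt_succ h)]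
        simp [mySplit, hc]
        cases hms : mySplit rest with
        | nil => exact absurd hms (mySplit_ne_nil rest)
        | cons w t => simp [headCons]

theorem splitOn_space (s : List Char) : PySem.Chars.splitOn s [' '] = mySplit s := by
  rw [PySem.Chars.splitOn, splitOn_go_eq (s.length + 1) s [] [] (by omega)]
  cases hms : mySplit s with
  | nil => exact absurd hms (mySplit_ne_nil s)
  | cons w t => simp [headCons]

-- character-level facts
theorem char_le_iff (a c : Char) : (a ≤ c) ↔ a.toNat ≤ c.toNat := by
  rw [Char.le_def, UInt32.le_iff_toNat_le]; rfl

theorem islower_iff (c : Char) : PySem.Chars.islower c = true ↔ 97 ≤ c.toNat ∧ c.toNat ≤ 122 := by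
  simp [PySem.Chars.islower, char_le_iff]

theorem isupper_iff (c : Char) : PySem.Chars.isupper c = true ↔ 65 ≤ c.toNat ∧ c.toNat ≤ 90 := by
  simp [PySem.Chars.isupper, char_le_iff]

theorem toNat_ofNat_valid (n : Nat) (h : n < 55000) : (Char.ofNat n).toNat = n := by
  simp [Char.toNat_ofNat, Nat.isValidChar]; omega

theorem upperChar_upperChar (c : Char) :
    PySem.Chars.upperChar (PySem.Chars.upperChar c) = PySem.Chars.upperChar c := by
  by_cases hl : PySem.Chars.islower c = true
  · obtain ⟨h1, h2⟩ := (islower_iff c).mp hl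
    have hu : PySem.Chars.upperChar c = Char.ofNat (c.toNat - 32) := by
      simp [PySem.Chars.upperChar, hl]
    have ht : (Char.ofNat (c.toNat - 32)).toNat = c.toNat - 32 := toNat_ofNat_valid _ (by omega)
    have hnl : PySem.Chars.islower (Char.ofNat (c.toNat - 32)) = false := by
      rw [Bool.eq_false_iff]; intro hcon
      obtain ⟨ha, _⟩ := (islower_iff _).mp hcon
      rw [ht] at ha; omega
    rw [hu]; simp [PySem.Chars.upperChar, hnl]
  · simp [PySem.Chars.upperChar, hl]

theorem upperChar_lowerChar (c : Char) :
    PySem.Chars.upperChar (PySem.Chars.lowerChar c) = PySem.Chars.upperChar c := by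
  by_cases hu : PySem.Chars.isupper c = true
  · obtain ⟨h1, h2⟩ := (isupper_iff c).mp hu
    have hl : PySem.Chars.lowerChar c = Char.ofNat (c.toNat + 32) := by
      simp [PySem.Chars.lowerChar, hu]
    have ht : (Char.ofNat (c.toNat + 32)).toNat = c.toNat + 32 := toNat_ofNat_valid _ (by omega)
    have hll : PySem.Chars.islower (Char.ofNat (c.toNat + 32)) = true := by
      rw [islower_iff, ht]; omega
    have hnl : PySem.Chars.islower c = false := by
      rw [Bool.eq_false_iff]; intro hcon
      obtain ⟨ha, _⟩ := (islower_iff _).mp hcon; omega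
    rw [hl]
    simp [PySem.Chars.upperChar, hll, hnl, ht]
  · simp [PySem.Chars.lowerChar, hu]

theorem upperChar_titleChar (b : Bool) (c : Char) :
    PySem.Chars.upperChar (titleChar b c) = PySem.Chars.upperChar c := by
  unfold titleChar
  split
  · cases b with
    | true => simp [upperChar_lowerChar]
    | false => simp [upperChar_upperChar]
  · rfl

theorem upper_pyTitle (s : List Char) (b : Bool) :
    PySem.Chars.upper (pyTitle b s) = PySem.Chars.upper s := by
  induction s generalizing b with
  | nil => rfl
  | cons c r ih =>
    have hih := ih (PySem.Chars.isalpha c)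
    simp only [PySem.Chars.upper] at hih
    simp [pyTitle, PySem.Chars.upper, upperChar_titleChar, hih]

theorem titleChar_space (b : Bool) : titleChar b ' ' = ' ' := by cases b <;> decide

theorem upperChar_ne_space (c : Char) (h : c ≠ ' ') : PySem.Chars.upperChar c ≠ ' ' := by
  by_cases hl : PySem.Chars.islower c = true
  · obtain ⟨h1, h2⟩ := (islower_iff c).mp hl
    have he : PySem.Chars.upperChar c = Char.ofNat (c.toNat - 32) := by
      simp [PySem.Chars.upperChar, hl]
    rw [he]
    intro hcon
    have := congrArg Char.toNat hcon
    rw [toNat_ofNat_valid _ (by omega)] at this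
    have h32 : (' ' : Char).toNat = 32 := by decide
    omega
  · simpa [PySem.Chars.upperChar, hl] using h

theorem lowerChar_ne_space (c : Char) (h : c ≠ ' ') : PySem.Chars.lowerChar c ≠ ' ' := by
  by_cases hu : PySem.Chars.isupper c = true
  · obtain ⟨h1, h2⟩ := (isupper_iff c).mp hu
    have he : PySem.Chars.lowerChar c = Char.ofNat (c.toNat + 32) := by
      simp [PySem.Chars.lowerChar, hu]
    rw [he]
    intro hcon
    have := congrArg Char.toNat hcon
    rw [toNat_ofNat_valid _ (by omega)] at this
    have h32 : (' ' : Char).toNat = 32 := by decide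
    omega
  · simpa [PySem.Chars.lowerChar, hu] using h

theorem titleChar_ne_space (b : Bool) (c : Char) (h : c ≠ ' ') : titleChar b c ≠ ' ' := by
  unfold titleChar
  split_ifs
  · exact lowerChar_ne_space c h
  · exact upperChar_ne_space c h
  · exact h

-- split-after-title = title-per-word
def headMapCons (b : Bool) : List (List Char) → List (List Char)
  | [] => []
  | w :: t => pyTitle b w :: t.map (pyTitle false)

theorem headMapCons_false (ws : List (List Char)) : headMapCons false ws = ws.map (pyTitle false) := by
  cases ws <;> simp [headMapCons]

theorem mySplit_pyTitle (s : List Char) (b : Bool) :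
    mySplit (pyTitle b s) = headMapCons b (mySplit s) := by
  induction s generalizing b with
  | nil => simp [mySplit, pyTitle, headMapCons]
  | cons c r ih =>
    by_cases hc : c = ' '
    · subst hc
      have ha : PySem.Chars.isalpha ' ' = false := by decide
      simp only [pyTitle, titleChar_space, ha, mySplit, if_pos rfl]
      rw [ih false, headMapCons_false]
      cases hms : mySplit r with
      | nil => exact absurd hms (mySplit_ne_nil r)
      | cons w t => simp [headMapCons, pyTitle]
    · have hc' : titleChar b c ≠ ' ' := titleChar_ne_space b c hc
      simp only [pyTitle, mySplit, if_neg hc, if_neg hc']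
      rw [ih (PySem.Chars.isalpha c)]
      cases hms : mySplit r with
      | nil => exact absurd hms (mySplit_ne_nil r)
      | cons w t => simp [headMapCons, headCons, pyTitle]

theorem splitOn_title (s : List Char) :
    PySem.Chars.splitOn (pyTitle false s) [' '] = (PySem.Chars.splitOn s [' ']).map (pyTitle false) := by
  rw [splitOn_space, splitOn_space, mySplit_pyTitle, headMapCons_false]

-- the index-fixup foldl of port A, computed as a map
theorem set_len_append (pre : List (List Char)) (y v : List Char) (zs : List (List Char)) :
    (pre ++ y :: zs).set pre.length v = pre ++ v :: zs := by
  induction pre with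
  | nil => simp
  | cons a t ih => simp [List.set, ih]

theorem getD_len_append (pre : List (List Char)) (y : List Char) (zs : List (List Char)) (d : List Char) :
    (pre ++ y :: zs).getD pre.length d = y := by
  simp [List.getD, List.getElem?_append_right (Nat.le_refl pre.length)]

theorem fold_set (P : List Char → Bool) (T U : List Char → List Char) :
    ∀ (ws0 pre : List (List Char)) (k : Int), k = (pre.length : Int) →
      (((PySem.List.enumerate ws0 k).filter (fun p => P p.2)).map (·.1)).foldl
          (fun ws i => PySem.List.pySetD ws i (U (PySem.List.pyGetD ws i []))) (pre ++ ws0.map T)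
        = pre ++ ws0.map (fun w => if P w then U (T w) else T w) := by
  intro ws0
  induction ws0 with
  | nil => intro pre k hk; simp [PySem.List.enumerate]
  | cons w rest ih =>
    intro pre k hk
    subst hk
    rw [PySem.List.enumerate_cons]
    by_cases hp : P w = true
    · rw [List.filter_cons, if_pos (by simp [hp])]
      simp only [List.map_cons, List.foldl_cons]
      have hget : PySem.List.pyGetD (pre ++ T w :: rest.map T) (pre.length : Int) [] = T w := by
        rw [PySem.List.pyGetD_natCast, getD_len_append]
      have hset : PySem.List.pySetD (pre ++ T w :: rest.map T) (pre.length : Int) (U (T w))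
          = (pre ++ [U (T w)]) ++ rest.map T := by
        rw [PySem.List.pySetD_natCast, set_len_append]; simp
      rw [hget, hset, ih (pre ++ [U (T w)]) _ (by simp)]
      simp [hp]
    · rw [List.filter_cons, if_neg (by simp [hp])]
      simp only [List.map_cons]
      have hsplit : (pre ++ T w :: rest.map T) = (pre ++ [T w]) ++ rest.map T := by simp
      rw [hsplit, ih (pre ++ [T w]) _ (by simp)]
      simp [hp]

-- ===== VERDICT (by name: the statement is the Claim_ definition above) =====
theorem title_style_spec : Claim_equal_title_style := by
  intro name _
  show title_style name = title_style_alt name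
  have hf := fold_set pyIsupper (pyTitle false) PySem.Chars.upper
    (PySem.Chars.splitOn name.toList [' ']) [] 0 (by simp)
  simp only [List.nil_append] at hf
  simp only [title_style, title_style_alt]
  rw [splitOn_title, hf]
  congr 1
  apply congrArg
  apply List.map_congr_left
  intro w _
  by_cases hp : pyIsupper w = true
  · simp [hp, upper_pyTitle]
  · simp [hp]
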